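-- pv_equiv track=rewrite | github.com/parkjisu6239/2021_APS | SWEA/4835_구간합/s2.py | Section_sum
-- ===== SOURCE A (Python) =====
-- def Section_sum(N, M, numbers):
--     # 편의상 큰 숫자를 N으로 지정
--     if N < M:
--         N, M = M, N
--
--     # 첫번째 구간합을 구해, 최대최소 초기화
--     section_sum = 0
--     for i in range(M):
--         section_sum += numbers[i]
--     max_sum = min_sum =  section_sum
--
--     # 위에서 구한거 다음부터 구할 것임
--     for j in range(1, N-M+1):
--         # 구간합의 경우 전구간과 현구간은 맨앞 맨뒤를 제외한 중간 부분은 중복됨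
--         # 그래서 현구간합은 앞에건 빼고, 뒤에건 더하면 됨
--         section_sum = section_sum - numbers[j-1] + numbers[j+M-1]
--         # 그렇게 구한 구간합이 min,max보다 크거나/작으면 최대최소로 지정
--         if max_sum < section_sum:
--             max_sum = section_sum
--         if min_sum > section_sum:
--             min_sum = section_sum
--
--     return max_sum - min_sum
-- ===== SOURCE B (Python) =====
-- def Section_sum(N, M, numbers):
--     if N < M:
--         N, M = M, N
--     prefix = [0]
--     for x in numbers:
--         prefix.append(prefix[-1] + x)
--     sums = [prefix[i + M] - prefix[i] for i in range(N - M + 1)]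
--     return max(sums) - min(sums)
-- ===== Notes on version B (the rewrite author's own statement) =====
-- stated objective: alternative
-- what changed: Replaced A's single sliding-window scan carrying a running sum/max/min through one loop by a prefix-sum table, a materialised list of window sums obtained as random-access prefix differences, and library max/min.
-- outside the precondition, e.g. on Section_sum(2, -1, [1, 2, 3]): A returns 2, B returns 9
import Mathlib
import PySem

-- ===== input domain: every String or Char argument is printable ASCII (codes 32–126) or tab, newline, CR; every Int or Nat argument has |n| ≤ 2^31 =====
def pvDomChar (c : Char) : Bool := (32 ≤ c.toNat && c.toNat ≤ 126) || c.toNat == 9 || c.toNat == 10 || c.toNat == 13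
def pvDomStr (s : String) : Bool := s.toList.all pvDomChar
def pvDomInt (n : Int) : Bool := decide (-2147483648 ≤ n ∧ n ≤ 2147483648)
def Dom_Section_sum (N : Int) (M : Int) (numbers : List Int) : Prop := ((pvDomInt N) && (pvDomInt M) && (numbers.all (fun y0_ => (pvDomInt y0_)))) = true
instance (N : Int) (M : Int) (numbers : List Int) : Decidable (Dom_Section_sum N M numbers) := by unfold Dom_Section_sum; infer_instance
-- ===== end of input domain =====

-- B replaces A's single sliding-window scan by a prefix-sum table with random-access
-- window differences and library max/min (objective: alternative decomposition, same O(N) cost).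

-- ===== PORT A =====
-- literal port of A: sliding window, running max/min in one loop
def Section_sum (N : Int) (M : Int) (numbers : List Int) : Int :=
  let p : Int × Int := if N < M then (M, N) else (N, M)
  let n := p.1
  let m := p.2
  let s0 := (PySem.List.pyRange 0 m 1).foldl
      (fun s i => s + PySem.List.pyGetD numbers i 0) 0
  let st := (PySem.List.pyRange 1 (n - m + 1) 1).foldl
      (fun (st : Int × Int × Int) j =>
        let s := st.1 - PySem.List.pyGetD numbers (j - 1) 0
                      + PySem.List.pyGetD numbers (j + m - 1) 0
        let mx := if st.2.1 < s then s else st.2.1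
        let mn := if s < st.2.2 then s else st.2.2
        (s, mx, mn))
      (s0, s0, s0)
  st.2.1 - st.2.2

-- ===== PORT B =====
-- literal port of B: build prefix-sum list, list of window sums, max minus min
def Section_sum_alt (N : Int) (M : Int) (numbers : List Int) : Int :=
  let p : Int × Int := if N < M then (M, N) else (N, M)
  let n := p.1
  let m := p.2
  let prefix_ := numbers.foldl
      (fun pr x => pr ++ [PySem.List.pyGetD pr (-1) 0 + x]) [(0 : Int)]
  let sums := (PySem.List.pyRange 0 (n - m + 1) 1).map
      (fun i => PySem.List.pyGetD prefix_ (i + m) 0 - PySem.List.pyGetD prefix_ i 0)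
  (PySem.List.max? sums (fun y => y)).getD 0 - (PySem.List.min? sums (fun y => y)).getD 0

-- ===== PRECONDITION & SPEC =====
-- Pre_ restricts to the natural domain of the task (window/list lengths are counts):
-- both N and M nonnegative and at most len(numbers). Outside it A either raises
-- IndexError or, for a negative M, returns a value produced by Python's
-- negative-index wraparound, which is not a meaningful section sum.
def Pre_Section_sum (N : Int) (M : Int) (numbers : List Int) : Prop :=
  0 ≤ N ∧ 0 ≤ M ∧ N ≤ (numbers.length : Int) ∧ M ≤ (numbers.length : Int)
instance (N : Int) (M : Int) (numbers : List Int) : Decidable (Pre_Section_sum N M numbers) := by unfold Pre_Section_sum; infer_instance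

def pvWitness_Section_sum : Int × Int × List Int := (3, 2, [1, -4, 2])

def Spec_Section_sum (N : Int) (M : Int) (numbers : List Int) (out : Int) : Prop := out = Section_sum_alt N M numbers
instance (N : Int) (M : Int) (numbers : List Int) (out : Int) : Decidable (Spec_Section_sum N M numbers out) := by unfold Spec_Section_sum; infer_instance

-- ===== CLAIM (what is proved, stated in full; the proofs are below) =====
def Claim_equal_Section_sum : Prop := ∀ (N : Int) (M : Int) (numbers : List Int), Dom_Section_sum N M numbers → Pre_Section_sum N M numbers → Spec_Section_sum N M numbers (Section_sum N M numbers)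

-- ===== LEMMAS AND PROOFS =====

-- prefix sum up to Int index i
def pvS (numbers : List Int) (i : Int) : Int := (numbers.take i.toNat).sum
-- k-th window sum (window length m)
def pvW (numbers : List Int) (m : Int) (k : Nat) : Int :=
  pvS numbers (↑k + m) - pvS numbers ↑k
-- running max/min of W 0 .. W k
def pvRunMax (W : Nat → Int) : Nat → Int
  | 0 => W 0
  | (k+1) => max (pvRunMax W k) (W (k+1))
def pvRunMin (W : Nat → Int) : Nat → Int
  | 0 => W 0
  | (k+1) => min (pvRunMin W k) (W (k+1))

lemma pvS_succ (numbers : List Int) (i : Int) (h0 : 0 ≤ i) (h : i < (numbers.length : Int)) :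
    pvS numbers (i + 1) = pvS numbers i + numbers.getD i.toNat 0 := by
  have ht : i.toNat < numbers.length := by omega
  have h1 : (i + 1).toNat = i.toNat + 1 := by omega
  rw [pvS, pvS, h1, List.take_add_one, List.sum_append,
    List.getElem?_eq_getElem ht, List.getD_eq_getElem _ _ ht]
  simp

lemma pv_s0 (numbers : List Int) (m : Int) (h0 : 0 ≤ m) (h : m ≤ (numbers.length : Int)) :
    (PySem.List.pyRange 0 m 1).foldl (fun s i => s + PySem.List.pyGetD numbers i 0) 0
      = pvS numbers m := by
  rw [PySem.List.pyRange_one]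
  have hm : (m - 0).toNat = m.toNat := by omega
  rw [hm]
  have key : ∀ (K : Nat), K ≤ numbers.length →
      ((List.range K).map (fun k : Nat => (0 : Int) + ↑k)).foldl
        (fun s i => s + PySem.List.pyGetD numbers i 0) 0 = (numbers.take K).sum := by
    intro K
    induction K with
    | zero => simp
    | succ k ih =>
      intro hk
      have hklt : k < numbers.length := by omega
      rw [List.range_succ, List.map_append, List.foldl_append, ih (by omega)]
      rw [List.take_add_one, List.sum_append, List.getElem?_eq_getElem hklt]
      simp [PySem.List.pyGetD_natCast, List.getElem?_eq_getElem hklt]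
  have := key m.toNat (by omega)
  simpa [pvS] using this

lemma pv_prefix_scanl (xs : List Int) : ∀ (acc : List Int) (a : Int),
    List.foldl (fun pr x => pr ++ [PySem.List.pyGetD pr (-1) 0 + x]) (acc ++ [a]) xs
      = acc ++ List.scanl (· + ·) a xs := by
  induction xs with
  | nil => intro acc a; simp
  | cons x xs ih =>
    intro acc a
    rw [List.foldl_cons, PySem.List.pyGetD_neg_one_append_singleton]
    have h2 : acc ++ [a] ++ [a + x] = (acc ++ [a]) ++ [a + x] := by simp
    rw [h2, ih (acc ++ [a]) (a + x), List.scanl_cons]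
    simp

lemma pv_scanl_getD (xs : List Int) : ∀ (b : Int) (k : Nat), k ≤ xs.length →
    (List.scanl (· + ·) b xs).getD k 0 = b + (xs.take k).sum := by
  induction xs with
  | nil =>
    intro b k hk
    have : k = 0 := by simpa using hk
    simp [this, List.scanl]
  | cons x xs ih =>
    intro b k hk
    cases k with
    | zero => simp [List.scanl]
    | succ k =>
      rw [List.scanl_cons]
      have : (b :: List.scanl (· + ·) (b + x) xs).getD (k + 1) 0
          = (List.scanl (· + ·) (b + x) xs).getD k 0 := rfl
      rw [this, ih (b + x) k (by simpa using hk)]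
      simp
      ring

lemma pv_foldl_max (W : Nat → Int) : ∀ k,
    ((List.range k).map (fun j => W (j+1))).foldl max (W 0) = pvRunMax W k := by
  intro k
  induction k with
  | zero => simp [pvRunMax]
  | succ k ih =>
    rw [List.range_succ, List.map_append, List.foldl_append, ih]
    simp [pvRunMax]

lemma pv_foldl_min (W : Nat → Int) : ∀ k,
    ((List.range k).map (fun j => W (j+1))).foldl min (W 0) = pvRunMin W k := by
  intro k
  induction k with
  | zero => simp [pvRunMin]
  | succ k ih =>
    rw [List.range_succ, List.map_append, List.foldl_append, ih]
    simp [pvRunMin]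

lemma pvW_slide (numbers : List Int) (n m : Int) (h0 : 0 ≤ m)
    (hn : n ≤ (numbers.length : Int)) (k : Nat) (hk : (k : Int) + 1 ≤ n - m) :
    pvW numbers m (k+1)
      = pvW numbers m k - numbers.getD k 0 + numbers.getD (k + m.toNat) 0 := by
  have e1 := pvS_succ numbers (↑k + m) (by omega) (by omega)
  have e2 := pvS_succ numbers ↑k (by omega) (by omega)
  have t1 : ((↑k + m : Int)).toNat = k + m.toNat := by omega
  have t2 : ((k : Int)).toNat = k := by omega
  rw [t1] at e1
  rw [t2] at e2
  unfold pvW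
  push_cast
  rw [show ((k : Int) + 1 + m) = (↑k + m) + 1 by ring, e1, e2]
  ring

lemma pv_Aloop (numbers : List Int) (n m : Int) (h0 : 0 ≤ m)
    (hn : n ≤ (numbers.length : Int)) : ∀ k : Nat, (k : Int) ≤ n - m →
    ((List.range k).map (fun t : Nat => (1 : Int) + ↑t)).foldl
      (fun (st : Int × Int × Int) j =>
        let s := st.1 - PySem.List.pyGetD numbers (j - 1) 0
                      + PySem.List.pyGetD numbers (j + m - 1) 0
        let mx := if st.2.1 < s then s else st.2.1
        let mn := if s < st.2.2 then s else st.2.2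
        (s, mx, mn))
      (pvW numbers m 0, pvW numbers m 0, pvW numbers m 0)
    = (pvW numbers m k, pvRunMax (pvW numbers m) k, pvRunMin (pvW numbers m) k) := by
  intro k
  induction k with
  | zero => intro _; simp [pvRunMax, pvRunMin]
  | succ k ih =>
    intro hk
    rw [List.range_succ, List.map_append, List.foldl_append,
      ih (by push_cast at hk ⊢; omega)]
    simp only [List.map_cons, List.map_nil, List.foldl_cons, List.foldl_nil]
    have i1 : (1 : Int) + ↑k - 1 = ((k : Nat) : Int) := by ring
    have i2 : (1 : Int) + ↑k + m - 1 = ((k + m.toNat : Nat) : Int) := by push_cast; omega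
    rw [i1, i2, PySem.List.pyGetD_natCast, PySem.List.pyGetD_natCast]
    have hs : pvW numbers m k - numbers.getD k 0 + numbers.getD (k + m.toNat) 0
        = pvW numbers m (k+1) := (pvW_slide numbers n m h0 hn k (by push_cast at hk ⊢; omega)).symm
    rw [hs]
    have hmx : (if pvRunMax (pvW numbers m) k < pvW numbers m (k+1)
        then pvW numbers m (k+1) else pvRunMax (pvW numbers m) k)
        = pvRunMax (pvW numbers m) (k+1) := by
      rw [pvRunMax]
      rcases lt_or_ge (pvRunMax (pvW numbers m) k) (pvW numbers m (k+1)) with h | h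
      · rw [if_pos h, max_eq_right h.le]
      · rw [if_neg (not_lt.2 h), max_eq_left h]
    have hmn : (if pvW numbers m (k+1) < pvRunMin (pvW numbers m) k
        then pvW numbers m (k+1) else pvRunMin (pvW numbers m) k)
        = pvRunMin (pvW numbers m) (k+1) := by
      rw [pvRunMin]
      rcases lt_or_ge (pvW numbers m (k+1)) (pvRunMin (pvW numbers m) k) with h | h
      · rw [if_pos h, min_eq_right h.le]
      · rw [if_neg (not_lt.2 h), min_eq_left h]
    rw [hmx, hmn]

lemma pv_swapA (N M : Int) (numbers : List Int) (h : N < M) :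
    Section_sum N M numbers = Section_sum M N numbers := by
  unfold Section_sum
  rw [if_pos h, if_neg (not_lt.2 h.le)]

lemma pv_swapB (N M : Int) (numbers : List Int) (h : N < M) :
    Section_sum_alt N M numbers = Section_sum_alt M N numbers := by
  unfold Section_sum_alt
  rw [if_pos h, if_neg (not_lt.2 h.le)]

-- both sides equal runMax − runMin for the core (n = window count bound, m = width)
lemma pv_core (numbers : List Int) (n m : Int) (h0 : 0 ≤ m) (hmn : m ≤ n)
    (hn : n ≤ (numbers.length : Int)) :
    Section_sum n m numbers = Section_sum_alt n m numbers := by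
  have hK : ((((n - m).toNat : Nat)) : Int) = n - m := by omega
  set K := (n - m).toNat with hKdef
  have hW0 : pvS numbers m = pvW numbers m 0 := by
    unfold pvW pvS; norm_num
  -- A side
  have hA : Section_sum n m numbers
      = pvRunMax (pvW numbers m) K - pvRunMin (pvW numbers m) K := by
    unfold Section_sum
    rw [if_neg (not_lt.2 hmn)]
    simp only
    rw [pv_s0 numbers m h0 (le_trans hmn hn), hW0]
    rw [PySem.List.pyRange_one 1 (n - m + 1)]
    have e : (n - m + 1 - 1).toNat = K := by omega
    rw [e]
    rw [pv_Aloop numbers n m h0 hn K (by omega)]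
  -- B side
  have hpref : numbers.foldl
      (fun pr x => pr ++ [PySem.List.pyGetD pr (-1) 0 + x]) [(0 : Int)]
      = List.scanl (· + ·) 0 numbers := by
    simpa using pv_prefix_scanl numbers [] 0
  have hB : Section_sum_alt n m numbers
      = pvRunMax (pvW numbers m) K - pvRunMin (pvW numbers m) K := by
    unfold Section_sum_alt
    rw [if_neg (not_lt.2 hmn)]
    simp only
    rw [hpref, PySem.List.pyRange_one 0 (n - m + 1)]
    have e : (n - m + 1 - 0).toNat = K + 1 := by omega
    rw [e, List.map_map]
    have hmap : (List.range (K + 1)).map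
        ((fun i => PySem.List.pyGetD (List.scanl (· + ·) 0 numbers) (i + m) 0
            - PySem.List.pyGetD (List.scanl (· + ·) 0 numbers) i 0) ∘ (fun k : Nat => (0 : Int) + ↑k))
        = (List.range (K + 1)).map (pvW numbers m) := by
      apply List.map_congr_left
      intro t ht
      rw [List.mem_range] at ht
      have htK : (t : Int) ≤ n - m := by omega
      have e1 : (0 : Int) + ↑t + m = ((t + m.toNat : Nat) : Int) := by push_cast; omega
      have e2 : (0 : Int) + (t : Int) = ((t : Nat) : Int) := by ring
      simp only [Function.comp_apply]
      rw [e1, e2, PySem.List.pyGetD_natCast, PySem.List.pyGetD_natCast,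
        pv_scanl_getD numbers 0 (t + m.toNat) (by omega),
        pv_scanl_getD numbers 0 t (by omega)]
      unfold pvW pvS
      have t1 : ((↑t + m : Int)).toNat = t + m.toNat := by omega
      have t2 : (((t : Nat) : Int)).toNat = t := by omega
      rw [t1, t2]
      ring
    rw [hmap, List.range_succ_eq_map, List.map_cons,
      PySem.List.max?_id_cons, PySem.List.min?_id_cons, Option.getD_some, Option.getD_some,
      List.map_map]
    have hc : (pvW numbers m ∘ Nat.succ) = (fun j => pvW numbers m (j + 1)) := by
      funext j; simp [Nat.succ_eq_add_one]
    rw [hc, pv_foldl_max, pv_foldl_min]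
  rw [hA, hB]

-- ===== VERDICT (by name: the statement is the Claim_ definition above) =====
theorem Section_sum_spec : Claim_equal_Section_sum := by
  intro N M numbers _ hpre
  obtain ⟨h1, h2, h3, h4⟩ := hpre
  unfold Spec_Section_sum
  by_cases hNM : N < M
  · rw [pv_swapA N M numbers hNM, pv_swapB N M numbers hNM]
    exact pv_core numbers M N h1 hNM.le h4
  · exact pv_core numbers N M h2 (not_lt.1 hNM) h3
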